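-- pv_equiv track=rewrite | github.com/Josue87/BoomER | extra_functions/xor_encode86.py | get_shellcode
-- ===== SOURCE A (Python) =====
-- def get_shellcode(sc):
--     exit = False
--     key = 0
--     shellcode2 = []
--     while not exit:
--         exit = True
--         key += 1
--         for s in sc:
--             value =  ord(s) ^ key
--             if value == 0:
--                 shellcode2 = []
--                 exit = False
--                 break
--             shellcode2.append(value)
--     return key, shellcode2
-- ===== SOURCE B (Python) =====
-- def get_shellcode(sc):
--     vals = sorted(ord(s) for s in sc)
--     key = 1
--     for v in vals:
--         if v < key:
--             continue
--         elif v == key: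
--             key += 1
--         else:
--             break
--     return key, [ord(s) ^ key for s in sc]
-- ===== Notes on version B (the rewrite author's own statement) =====
-- stated objective: alternative
-- what changed: B sorts the ord values once and finds the smallest positive key absent from them in a single scan (skip/increment/break), then encodes in one comprehension, instead of A's restart-the-whole-scan-per-candidate-key loop.
import Mathlib
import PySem

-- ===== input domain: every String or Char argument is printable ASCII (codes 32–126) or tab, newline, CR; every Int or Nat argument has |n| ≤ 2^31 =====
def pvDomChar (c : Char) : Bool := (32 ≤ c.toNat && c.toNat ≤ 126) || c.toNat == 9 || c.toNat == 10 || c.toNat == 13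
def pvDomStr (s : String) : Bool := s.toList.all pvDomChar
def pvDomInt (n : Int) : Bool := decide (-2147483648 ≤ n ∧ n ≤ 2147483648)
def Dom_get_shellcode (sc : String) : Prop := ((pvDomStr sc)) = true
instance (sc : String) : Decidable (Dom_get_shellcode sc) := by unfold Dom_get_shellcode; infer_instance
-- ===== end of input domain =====

-- B replaces A's restart-the-scan-per-candidate-key search by sorting the ord values once and
-- finding the smallest positive absent value in a single scan (objective: alternative algorithm).

-- ===== PORT A =====
-- ord values of the string (ord(s) for s in sc)
def pvOrds (sc : String) : List Int := sc.toList.map (fun c => (c.toNat : Int))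

-- the inner 'for s in sc' loop of A: appends ord(s)^key; 'none' = the break (value == 0, shellcode2 reset)
def pvInner : List Int → Int → List Int → Option (List Int)
  | [], _, acc => some acc
  | v :: t, key, acc =>
      let value := Int.xor v key          -- ord(s) ^ key (Python ^ on ints)
      if value = 0 then none
      else pvInner t key (acc ++ [value])

-- the outer 'while not exit' loop; fuel only makes the recursion structural (with fuel = |sc| + 1
-- the 0-fuel branch is never reached: some key ≤ |sc| + 1 succeeds)
def pvLoop : List Int → Nat → Int → Int × List Int
  | _, 0, key => (key, [])
  | l, fuel + 1, key =>
      match pvInner l (key + 1) [] with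
      | some out => (key + 1, out)
      | none => pvLoop l fuel (key + 1)

def get_shellcode (sc : String) : Int × List Int :=
  let l := pvOrds sc
  pvLoop l (l.length + 1) 0

-- ===== PORT B =====
-- the 'for v in vals' scan of Source B: skip values below key, bump key on a hit, break above
def pvBkey : List Int → Int → Int
  | [], key => key
  | v :: t, key =>
      if v < key then pvBkey t key
      else if v = key then pvBkey t (key + 1)
      else key

def get_shellcode_alt (sc : String) : Int × List Int :=
  let vals := PySem.List.sorted (pvOrds sc) (fun v => v) false   -- sorted(ord(s) for s in sc)
  let key := pvBkey vals 1
  (key, (pvOrds sc).map (fun v => Int.xor v key))                -- [ord(s) ^ key for s in sc]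

-- ===== PRECONDITION & SPEC =====
def Spec_get_shellcode (sc : String) (out : Int × List Int) : Prop := out = get_shellcode_alt sc
instance (sc : String) (out : Int × List Int) : Decidable (Spec_get_shellcode sc out) := by unfold Spec_get_shellcode; infer_instance

-- ===== CLAIM (what is proved, stated in full; the proofs are below) =====
def Claim_equal_get_shellcode : Prop := ∀ (sc : String), Dom_get_shellcode sc → Spec_get_shellcode sc (get_shellcode sc)

-- ===== LEMMAS AND PROOFS =====

theorem intXor_eq_zero (a b : Int) : Int.xor a b = 0 ↔ a = b := by
  cases a <;> cases b <;> simp [Int.xor, Nat.xor_eq_zero_iff]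

theorem pvInner_eq (l : List Int) (key : Int) (acc : List Int) :
    pvInner l key acc =
      if key ∈ l then none else some (acc ++ l.map (fun v => Int.xor v key)) := by
  induction l generalizing acc with
  | nil => simp [pvInner]
  | cons v t ih =>
      simp only [pvInner, List.mem_cons]
      by_cases hv : v = key
      · simp [hv, intXor_eq_zero]
      · have hx : ¬ Int.xor v key = 0 := by simpa [intXor_eq_zero] using hv
        have hv' : ¬ key = v := fun h => hv h.symm
        simp [hx, hv', ih]

-- A's loop returns (K, encode K) once we know K is the first candidate > key not in l
theorem pvLoop_eq (fuel : Nat) (l : List Int) (key K : Int)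
    (hlt : key < K) (hK : K ∉ l) (hbetween : ∀ m, key < m → m < K → m ∈ l)
    (hfuel : K ≤ key + fuel) :
    pvLoop l fuel key = (K, l.map (fun v => Int.xor v K)) := by
  induction fuel generalizing key with
  | zero => omega
  | succ n ih =>
      simp only [pvLoop, pvInner_eq]
      by_cases hmem : key + 1 ∈ l
      · have hne : key + 1 ≠ K := fun h => hK (h ▸ hmem)
        simp only [hmem, if_true]
        exact ih (key + 1) (by omega) (fun m h1 h2 => hbetween m (by omega) h2) (by omega)
      · have hKe : key + 1 = K := by
          by_contra hne
          exact hmem (hbetween (key + 1) (by omega) (by omega))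
        simp [hKe, hK]

-- characterisation of B's sorted scan
theorem pvBkey_spec (s : List Int) (k : Int) (hs : s.Pairwise (· ≤ ·)) :
    k ≤ pvBkey s k ∧ pvBkey s k ∉ s ∧ (∀ m, k ≤ m → m < pvBkey s k → m ∈ s) := by
  induction s generalizing k with
  | nil => exact ⟨le_refl _, by simp, fun m h1 h2 => absurd (lt_of_le_of_lt h1 h2) (lt_irrefl _)⟩
  | cons v t ih =>
      have hpw := (List.pairwise_cons.mp hs)
      rcases lt_trichotomy v k with hv | hv | hv
      · have heq : pvBkey (v :: t) k = pvBkey t k := by simp [pvBkey, hv]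
        obtain ⟨h1, h2, h3⟩ := ih k hpw.2
        refine ⟨heq ▸ h1, ?_, ?_⟩
        · rw [heq]; simp only [List.mem_cons, not_or]
          exact ⟨by omega, h2⟩
        · intro m hm1 hm2
          exact List.mem_cons_of_mem _ (h3 m hm1 (heq ▸ hm2))
      · have heq : pvBkey (v :: t) k = pvBkey t (k + 1) := by
          simp [pvBkey, hv]
        obtain ⟨h1, h2, h3⟩ := ih (k + 1) hpw.2
        refine ⟨by omega, ?_, ?_⟩
        · rw [heq]; simp only [List.mem_cons, not_or]
          exact ⟨by omega, h2⟩
        · intro m hm1 hm2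
          rcases eq_or_lt_of_le hm1 with h | h
          · have hvm : v = m := by omega
            exact hvm ▸ List.mem_cons_self ..
          · exact List.mem_cons_of_mem _ (h3 m (by omega) (heq ▸ hm2))
      · have heq : pvBkey (v :: t) k = k := by
          simp [pvBkey]; omega
        refine ⟨?_, ?_, ?_⟩
        · rw [heq]
        · rw [heq]; simp only [List.mem_cons, not_or]
          exact ⟨by omega, fun hm => by have := hpw.1 _ hm; omega⟩
        · intro m hm1 hm2; rw [heq] at hm2; omega

-- pigeonhole: the key found by B is at most |l| + 1
theorem pvBkey_le (l : List Int) (K : Int)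
    (hbetween : ∀ m, 0 < m → m < K → m ∈ l) : K ≤ (l.length : Int) + 1 := by
  by_contra h
  push Not at h
  have hnodup : (List.range (l.length + 1)).Nodup := List.nodup_range
  have hnodup2 : ((List.range (l.length + 1)).map (fun i : Nat => (i : Int) + 1)).Nodup :=
    List.Nodup.map (fun a b hab => by omega) hnodup
  have hsub : ((List.range (l.length + 1)).map (fun i : Nat => (i : Int) + 1)) ⊆ l := by
    intro x hx
    simp only [List.mem_map, List.mem_range] at hx
    obtain ⟨i, hi, rfl⟩ := hx
    have hi' : (i : Int) < (l.length : Int) + 1 := by exact_mod_cast hi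
    exact hbetween _ (by omega) (by omega)
  have := (hnodup2.subperm hsub).length_le
  simp at this

-- ===== VERDICT (by name: the statement is the Claim_ definition above) =====
theorem get_shellcode_spec : Claim_equal_get_shellcode := by
  intro sc _
  unfold Spec_get_shellcode get_shellcode get_shellcode_alt
  set l := pvOrds sc with hl
  set s := PySem.List.sorted l (fun v => v) false with hs
  have hperm : s.Perm l := PySem.List.sorted_perm ..
  have hpw : s.Pairwise (· ≤ ·) := PySem.List.sorted_pairwise ..
  obtain ⟨h1, h2, h3⟩ := pvBkey_spec s 1 hpw
  set K := pvBkey s 1 with hK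
  have hKl : K ∉ l := fun h => h2 (hperm.mem_iff.mpr h)
  have hbet : ∀ m, (0 : Int) < m → m < K → m ∈ l := fun m hm1 hm2 =>
    hperm.mem_iff.mp (h3 m (by omega) hm2)
  have hlen : K ≤ (l.length : Int) + 1 := pvBkey_le l K hbet
  exact pvLoop_eq (l.length + 1) l 0 K (by omega) hKl (fun m a b => hbet m a b) (by push_cast; omega)
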